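-- pv_equiv track=rewrite | github.com/UIUC-ChenLab/PandoGen | prediction_tools.py | split_locations
-- ===== SOURCE A (Python) =====
-- def split_locations(
--     window: tuple,
--     frozen_locations: list = list()
-- ):
--     mask_positions = []
--     remaining_segment = window
--
--     if any(window[0] <= f < window[1] for f in frozen_locations):
--         for f in frozen_locations:
--             if remaining_segment[0] <= f < remaining_segment[1]:
--                 xlice = (remaining_segment[0], f)
--                 if xlice[1] - xlice[0] > 0:
--                     mask_positions.append(xlice)
--                 remaining_segment = (f + 1, remaining_segment[1])
--
--     if remaining_segment[1] - remaining_segment[0] > 0: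
--         mask_positions.append(remaining_segment)
--
--     return mask_positions
-- ===== SOURCE B (Python) =====
-- def split_locations(
--     window: tuple,
--     frozen_locations: list = list()
-- ):
--     lo, hi = window
--     # pass 1: collect the accepted cut positions with a moving cursor
--     cuts = []
--     cursor = lo
--     for f in frozen_locations:
--         if cursor <= f < hi:
--             cuts.append(f)
--             cursor = f + 1
--     # pass 2: flat boundary list [lo, f1, f1+1, f2, f2+1, ..., hi]
--     boundaries = [lo]
--     for f in cuts:
--         boundaries.append(f)
--         boundaries.append(f + 1)
--     boundaries.append(hi)
--     # pass 3: consecutive even/odd boundary pairs, keeping non-empty segments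
--     return [(boundaries[i], boundaries[i + 1])
--             for i in range(0, len(boundaries), 2)
--             if boundaries[i + 1] - boundaries[i] > 0]
-- ===== Notes on version B (the rewrite author's own statement) =====
-- stated objective: alternative
-- what changed: Replaces A's interleaved detect-and-emit loop over a shrinking remaining_segment (plus a redundant any() pre-scan) with a three-pass decomposition: collect cut positions, build a flat boundary list, then pair up consecutive boundaries into segments.
import Mathlib
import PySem

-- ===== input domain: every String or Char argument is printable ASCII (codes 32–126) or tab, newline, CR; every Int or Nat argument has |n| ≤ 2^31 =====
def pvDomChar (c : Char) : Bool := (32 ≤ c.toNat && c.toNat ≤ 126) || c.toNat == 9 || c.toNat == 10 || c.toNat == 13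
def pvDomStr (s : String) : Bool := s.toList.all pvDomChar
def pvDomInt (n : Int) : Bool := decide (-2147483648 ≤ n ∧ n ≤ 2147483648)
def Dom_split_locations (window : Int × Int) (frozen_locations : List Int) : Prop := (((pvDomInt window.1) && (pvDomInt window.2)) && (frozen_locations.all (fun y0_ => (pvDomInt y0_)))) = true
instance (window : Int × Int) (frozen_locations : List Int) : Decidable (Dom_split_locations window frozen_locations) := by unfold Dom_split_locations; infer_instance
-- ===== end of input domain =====

-- B replaces A's interleaved detect-and-emit loop with a collect-cuts / build-boundaries / pair-up decomposition (alternative structure, same cost).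


-- ===== PORT A =====
-- the for-loop over frozen_locations with state (mask_positions, remaining_segment)
def splitLoopA (frozen : List Int) (seg : Int × Int) (acc : List (Int × Int)) :
    List (Int × Int) × (Int × Int) :=
  match frozen with
  | [] => (acc, seg)
  | f :: rest =>
      if seg.1 ≤ f ∧ f < seg.2 then
        splitLoopA rest (f + 1, seg.2)
          (if f - seg.1 > 0 then acc ++ [(seg.1, f)] else acc)
      else
        splitLoopA rest seg acc

def split_locations (window : Int × Int) (frozen_locations : List Int) : List (Int × Int) :=
  let st :=
    if frozen_locations.any (fun f => decide (window.1 ≤ f ∧ f < window.2)) then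
      splitLoopA frozen_locations window []
    else ([], window)
  if st.2.2 - st.2.1 > 0 then st.1 ++ [st.2] else st.1

-- ===== PORT B =====
-- pass 1: cut positions accepted by the moving cursor
def cutsLoopB (frozen : List Int) (cursor hi : Int) : List Int :=
  match frozen with
  | [] => []
  | f :: rest =>
      if cursor ≤ f ∧ f < hi then f :: cutsLoopB rest (f + 1) hi
      else cutsLoopB rest cursor hi

-- pass 3: consecutive even/odd boundary pairs, keeping non-empty segments
def pairUpB : List Int → List (Int × Int)
  | a :: b :: rest => if b - a > 0 then (a, b) :: pairUpB rest else pairUpB rest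
  | _ => []

def split_locations_alt (window : Int × Int) (frozen_locations : List Int) : List (Int × Int) :=
  let cuts := cutsLoopB frozen_locations window.1 window.2
  -- pass 2: flat boundary list [lo, f1, f1+1, ..., hi]
  let boundaries := window.1 :: (cuts.flatMap (fun f => [f, f + 1]) ++ [window.2])
  pairUpB boundaries

-- ===== PRECONDITION & SPEC =====
def Spec_split_locations (window : Int × Int) (frozen_locations : List Int) (out : List (Int × Int)) : Prop := out = split_locations_alt window frozen_locations
instance (window : Int × Int) (frozen_locations : List Int) (out : List (Int × Int)) : Decidable (Spec_split_locations window frozen_locations out) := by unfold Spec_split_locations; infer_instance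

-- ===== CLAIM (what is proved, stated in full; the proofs are below) =====
def Claim_equal_split_locations : Prop := ∀ (window : Int × Int) (frozen_locations : List Int), Dom_split_locations window frozen_locations → Spec_split_locations window frozen_locations (split_locations window frozen_locations)

-- ===== LEMMAS AND PROOFS =====

-- main invariant: finishing A's loop from segment (s, e) and emitting the final
-- remainder equals acc ++ (B's segments built from the cuts collected from cursor s)
theorem loop_invariant (frozen : List Int) :
    ∀ (s e : Int) (acc : List (Int × Int)),
      (let st := splitLoopA frozen (s, e) acc
       if st.2.2 - st.2.1 > 0 then st.1 ++ [st.2] else st.1)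
      = acc ++ pairUpB (s :: ((cutsLoopB frozen s e).flatMap (fun f => [f, f + 1]) ++ [e])) := by
  induction frozen with
  | nil =>
      intro s e acc
      simp only [splitLoopA, cutsLoopB, List.flatMap_nil, List.nil_append, pairUpB]
      split_ifs <;> simp
  | cons f rest ih =>
      intro s e acc
      simp only [splitLoopA, cutsLoopB]
      by_cases h : s ≤ f ∧ f < e
      · simp only [if_pos h, List.flatMap_cons, List.cons_append, List.append_assoc]
        rw [ih (f + 1) e]
        simp only [pairUpB]
        split_ifs <;> simp
      · simp only [if_neg h]
        exact ih s e acc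

-- when no frozen location lies in [s, e), B collects no cuts
theorem cuts_none (frozen : List Int) (s e : Int)
    (h : ∀ f ∈ frozen, ¬ (s ≤ f ∧ f < e)) : cutsLoopB frozen s e = [] := by
  induction frozen with
  | nil => rfl
  | cons f rest ih =>
      simp only [cutsLoopB, if_neg (h f (List.mem_cons_self ..))]
      exact ih (fun g hg => h g (List.mem_cons_of_mem _ hg))

-- ===== VERDICT (by name: the statement is the Claim_ definition above) =====
theorem split_locations_spec : Claim_equal_split_locations := by
  intro window frozen _
  unfold Spec_split_locations split_locations split_locations_alt
  by_cases hg : frozen.any (fun f => decide (window.1 ≤ f ∧ f < window.2)) = true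
  · simp only [if_pos hg]
    have := loop_invariant frozen window.1 window.2 []
    simpa using this
  · have hnone : ∀ f ∈ frozen, ¬ (window.1 ≤ f ∧ f < window.2) := by
      intro f hf hc
      exact hg (List.any_eq_true.mpr ⟨f, hf, by simpa using hc⟩)
    simp only [if_neg hg, cuts_none frozen _ _ hnone, List.flatMap_nil, List.nil_append, pairUpB]
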